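-- pv_equiv track=rewrite | github.com/Uniquedex100/IITD_timetable_generator | scripts/parse_pdf.py | get_table_index
-- ===== SOURCE A (Python) =====
-- def get_table_index(page_text, course_code):
--     # Logic from get_lh.py: count how many "Room" markers appear before the course code
--     # We scan line by line to determine "blocks"
--
--     # Simpler approach matching get_lh.py:
--     # "items = page_text.split('\n')[1:] ... checkpoint += 1 if i.startswith('Room')"
--
--     lines = page_text.split('\n')
--     checkpoint = -1
--     found = False
--
--     # We need to be careful: the text might contain the course code multiple times?
--     # get_lh.py just checked "if course_code.upper() in i".
--     # But wait, we need the *first* occurrence? Or the one corresponding to the layout?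
--     # get_lh.py iterates lines.
--
--     # get_lh.py just checked "if course_code.upper() in i".
--     # But wait, we need the *first* occurrence? Or the one corresponding to the layout?
--     # get_lh.py iterates lines.
--
--     for line in lines:
--         stripped = line.strip()
--         if stripped.startswith('Room') and not stripped.startswith('Room Allotment'):
--             checkpoint += 1
--
--         # Check if course code is in this line.
--         # Note: Courses can be "APL105", "COL362/COL632".
--         # We need to be robust.
--         if course_code in line:
--             return checkpoint
--
--     return None
-- ===== SOURCE B (Python) =====
-- def get_table_index(page_text, course_code):
--     # Locate-then-count: find the first line containing the course code,
--     # then count qualifying 'Room' markers in the prefix up to and including it.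
--     lines = page_text.split('\n')
--     found = next((i for i, l in enumerate(lines) if course_code in l), None)
--     if found is None:
--         return None
--     marks = sum(1 for l in lines[:found + 1]
--                 if l.strip().startswith('Room')
--                 and not l.strip().startswith('Room Allotment'))
--     return marks - 1
-- ===== Notes on version B (the rewrite author's own statement) =====
-- stated objective: alternative
-- what changed: Replaces A's single interleaved scan with a mutable checkpoint counter by a locate-then-count decomposition: first find the index of the first line containing the course code, then count qualifying 'Room' markers in that prefix and subtract 1.
import Mathlib
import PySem

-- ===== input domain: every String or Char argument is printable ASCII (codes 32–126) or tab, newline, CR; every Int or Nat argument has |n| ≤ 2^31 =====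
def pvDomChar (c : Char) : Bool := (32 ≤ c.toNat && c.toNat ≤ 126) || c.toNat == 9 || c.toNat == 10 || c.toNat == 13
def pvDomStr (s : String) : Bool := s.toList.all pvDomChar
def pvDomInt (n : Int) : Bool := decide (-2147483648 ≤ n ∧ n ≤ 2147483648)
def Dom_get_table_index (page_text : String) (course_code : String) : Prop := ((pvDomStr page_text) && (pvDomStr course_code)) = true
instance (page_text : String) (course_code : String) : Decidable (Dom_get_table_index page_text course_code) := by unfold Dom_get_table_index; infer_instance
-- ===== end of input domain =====

-- B replaces A's single interleaved scan (mutable checkpoint) by a locate-then-count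
-- decomposition of the same cost (objective: alternative).

-- ===== PORT A =====
-- the for-loop of A: carries the running checkpoint; returns on the first line containing course_code
def pvLoopA (course_code : String) : List String → Int → Option Int
  | [], _ => none
  | line :: rest, checkpoint =>
    let stripped := PySem.Str.strip line
    let checkpoint :=
      if PySem.Str.startswith stripped "Room" && !(PySem.Str.startswith stripped "Room Allotment")
      then checkpoint + 1 else checkpoint
    if PySem.Str.isIn course_code line then some checkpoint
    else pvLoopA course_code rest checkpoint

def get_table_index (page_text : String) (course_code : String) : Option Int :=
  pvLoopA course_code (((PySem.Str.split? page_text "\n").getD [])) (-1)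

-- ===== PORT B =====
-- Source B's marker predicate: l.strip().startswith('Room') and not l.strip().startswith('Room Allotment')
def pvIsRoomMark (l : String) : Bool :=
  PySem.Str.startswith (PySem.Str.strip l) "Room"
    && !(PySem.Str.startswith (PySem.Str.strip l) "Room Allotment")

def get_table_index_alt (page_text : String) (course_code : String) : Option Int :=
  let lines := ((PySem.Str.split? page_text "\n").getD [])
  match lines.findIdx? (fun l => PySem.Str.isIn course_code l) with
  | none => none
  | some i => some (((lines.take (i + 1)).countP pvIsRoomMark : Int) - 1)

-- ===== PRECONDITION & SPEC =====
def Spec_get_table_index (page_text : String) (course_code : String) (out : Option Int) : Prop := out = get_table_index_alt page_text course_code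
instance (page_text : String) (course_code : String) (out : Option Int) : Decidable (Spec_get_table_index page_text course_code out) := by unfold Spec_get_table_index; infer_instance

-- ===== CLAIM (what is proved, stated in full; the proofs are below) =====
def Claim_equal_get_table_index : Prop := ∀ (page_text : String) (course_code : String), Dom_get_table_index page_text course_code → Spec_get_table_index page_text course_code (get_table_index page_text course_code)

-- ===== LEMMAS AND PROOFS =====

-- A's loop with accumulator c computes: find the first matching line, add the marker
-- count of the prefix (including that line) to c.
theorem pvLoopA_eq (cc : String) (lines : List String) (c : Int) :
    pvLoopA cc lines c =
      (lines.findIdx? (fun l => PySem.Str.isIn cc l)).map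
        (fun i => c + ((lines.take (i + 1)).countP pvIsRoomMark : Int)) := by
  induction lines generalizing c with
  | nil => rfl
  | cons line rest ih =>
    simp only [pvLoopA, List.findIdx?_cons]
    by_cases hfound : PySem.Str.isIn cc line
    · simp [hfound, pvIsRoomMark, List.countP_cons]
      split_ifs <;> simp_all
    · simp only [hfound, if_false]
      rw [ih]
      cases h : (rest.findIdx? (fun l => PySem.Str.isIn cc l)) with
      | none => simp [h, hfound]
      | some j =>
        simp [h, List.countP_cons, pvIsRoomMark]
        split_ifs <;> ring

-- ===== VERDICT (by name: the statement is the Claim_ definition above) =====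
theorem get_table_index_spec : Claim_equal_get_table_index := by
  intro page_text course_code _
  unfold Spec_get_table_index get_table_index get_table_index_alt
  rw [pvLoopA_eq]
  cases h : ((((PySem.Str.split? page_text "\n").getD [])).findIdx? (fun l => PySem.Str.isIn course_code l)) with
  | none => simp only [h, Option.map_none]
  | some i =>
      simp only [h, Option.map_some]
      congr 1
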